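-- pv_equiv track=rewrite | github.com/Bmcbob76/prometheus-prime | OMEGA_SWARM_BRAIN/omega_reflection_engine.py | _identify_divergences
-- ===== SOURCE A (Python) =====
-- from typing import Dict, List, Any, Optional
--
-- def _identify_divergences(perspectives: Dict[str, str]) -> List[str]:
--     """Identify where agent perspectives diverge"""
--     divergences = []
--
--     if len(perspectives) < 2:
--         return divergences
--
--     # Find unique interpretations
--     perspective_values = list(perspectives.values())
--     unique_values = set(perspective_values)
--
--     if len(unique_values) > 1:
--         for agent_id, perspective in perspectives.items():
--             count = perspective_values.count(perspective)
--             if count == 1: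
--                 divergences.append(
--                     f"{agent_id} has unique perspective: {perspective[:50]}..."
--                 )
--
--     return divergences
-- ===== SOURCE B (Python) =====
-- from typing import Dict, List
--
--
-- def _identify_divergences(perspectives: Dict[str, str]) -> List[str]:
--     """Identify where agent perspectives diverge (group-by-value formulation)."""
--     if len(perspectives) < 2:
--         return []
--
--     # One pass: index agents by their perspective value.
--     groups: Dict[str, List[str]] = {}
--     for agent_id, perspective in perspectives.items():
--         groups[perspective] = groups.get(perspective, []) + [agent_id]
--
--     # Second pass over the grouped table: singleton groups are the divergences.
--     divergences = []
--     for perspective, agents in groups.items():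
--         if len(agents) == 1:
--             divergences.append(
--                 f"{agents[0]} has unique perspective: {perspective[:50]}..."
--             )
--     return divergences
-- ===== Notes on version B (the rewrite author's own statement) =====
-- stated objective: faster
-- what changed: Replaces the quadratic agent loop with perspective_values.count(...) per agent (plus a redundant set guard) by a single grouping pass building a perspective->agents index, then emitting messages from the singleton groups in group insertion order.
import Mathlib
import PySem

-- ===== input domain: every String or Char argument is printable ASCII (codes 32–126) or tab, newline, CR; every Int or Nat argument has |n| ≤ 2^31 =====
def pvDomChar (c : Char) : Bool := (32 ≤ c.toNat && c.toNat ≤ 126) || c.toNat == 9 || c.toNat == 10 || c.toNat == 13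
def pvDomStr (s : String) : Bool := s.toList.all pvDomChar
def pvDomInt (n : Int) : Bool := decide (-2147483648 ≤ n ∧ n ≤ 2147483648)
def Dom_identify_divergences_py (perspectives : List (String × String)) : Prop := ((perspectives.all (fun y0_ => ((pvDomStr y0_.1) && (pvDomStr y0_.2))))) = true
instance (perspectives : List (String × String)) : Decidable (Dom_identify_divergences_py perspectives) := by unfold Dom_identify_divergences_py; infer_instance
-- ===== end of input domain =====

-- B replaces A's quadratic per-agent .count scan by one grouping pass (perspective -> agents)
-- and emits the singleton groups; objective: faster (asymptotic).

-- the f-string f"{agent_id} has unique perspective: {perspective[:50]}...", shared by both ports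
def pvMsg (agent perspective : String) : String :=
  agent ++ " has unique perspective: " ++ PySem.Str.slice perspective none (some 50) ++ "..."

-- ===== PORT A =====
def identify_divergences_py (perspectives : List (String × String)) : List String :=
  if perspectives.length < 2 then []
  else
    let perspective_values := perspectives.map (fun p => p.2)
    let unique_values := PySem.Set.ofList perspective_values
    if 1 < unique_values.length then
      perspectives.foldl (fun divergences p =>
        if perspective_values.count p.2 == 1 then divergences ++ [pvMsg p.1 p.2]
        else divergences) []
    else []

-- ===== PORT B =====
def identify_divergences_py_alt (perspectives : List (String × String)) : List String :=
  if perspectives.length < 2 then []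
  else
    let groups : PySem.Dict String (List String) :=
      perspectives.foldl (fun d p => d.modify p.2 [] (fun l => l ++ [p.1])) PySem.Dict.empty
    groups.items.foldl (fun divergences g =>
      if g.2.length == 1 then divergences ++ [pvMsg (PySem.List.pyGetD g.2 0 "") g.1]
      else divergences) []

-- ===== PRECONDITION & SPEC =====
def Spec_identify_divergences_py (perspectives : List (String × String)) (out : List String) : Prop := out = identify_divergences_py_alt perspectives
instance (perspectives : List (String × String)) (out : List String) : Decidable (Spec_identify_divergences_py perspectives out) := by unfold Spec_identify_divergences_py; infer_instance

-- ===== CLAIM (what is proved, stated in full; the proofs are below) =====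
def Claim_equal_identify_divergences_py : Prop := ∀ (perspectives : List (String × String)), Dom_identify_divergences_py perspectives → Spec_identify_divergences_py perspectives (identify_divergences_py perspectives)

-- ===== LEMMAS AND PROOFS =====

-- count of a value among the second components = length of the filtered list
theorem pv_cnt (ps : List (String × String)) (v : String) :
    (ps.map (fun p => p.2)).count v = (ps.filter (fun q => q.2 == v)).length := by
  simp [List.count_eq_countP, List.filter_map, List.countP_eq_length_filter, Function.comp_def]

-- Core: emitting the singleton groups in first-occurrence order of the values equals
-- emitting, in agent order, the agents whose value occurs exactly once.  S is the set of
-- values already consumed by the induction (excluded on both sides).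
theorem pv_core (ps : List (String × String)) (S : List String) :
    ((PySem.Set.ofList (ps.map (fun p => p.2))).filter
        (fun v => !S.contains v && ((ps.filter (fun q => q.2 == v)).length == 1))).map
      (fun v => pvMsg (PySem.List.pyGetD ((ps.filter (fun q => q.2 == v)).map (fun q => q.1)) 0 "") v)
    = (ps.filter (fun p => !S.contains p.2 && ((ps.filter (fun q => q.2 == p.2)).length == 1))).map
        (fun p => pvMsg p.1 p.2) := by
  induction ps generalizing S with
  | nil => simp
  | cons hd t ih =>
    obtain ⟨k, v⟩ := hd
    -- filtering the tail for a value other than v ignores the head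
    have h1 : ∀ y : String, y ≠ v →
        List.filter (fun q => q.2 == y) ((k, v) :: t) = List.filter (fun q => q.2 == y) t := by
      intro y hy
      simp [beq_eq_false_iff_ne.mpr (Ne.symm hy)]
    -- the two filtered tails coincide, with v pushed into the exclusion set
    have tail_eq :
        ((PySem.Set.ofList (t.map (fun p => p.2))).filter (fun y => !y == v)).filter
            (fun y => !S.contains y && ((List.filter (fun q => q.2 == y) ((k, v) :: t)).length == 1))
          = (PySem.Set.ofList (t.map (fun p => p.2))).filter
            (fun y => !(v :: S).contains y && ((List.filter (fun q => q.2 == y) t).length == 1)) := by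
      rw [List.filter_filter]
      apply List.filter_congr
      intro y _
      by_cases hyv : y = v
      · subst hyv; simp
      · simp [h1 y hyv, hyv]
    have tmap_eq :
        (((PySem.Set.ofList (t.map (fun p => p.2))).filter (fun y => !y == v)).filter
            (fun y => !S.contains y && ((List.filter (fun q => q.2 == y) ((k, v) :: t)).length == 1))).map
          (fun y => pvMsg (PySem.List.pyGetD ((List.filter (fun q => q.2 == y) ((k, v) :: t)).map (fun q => q.1)) 0 "") y)
        = (t.filter (fun p => !(v :: S).contains p.2 && ((t.filter (fun q => q.2 == p.2)).length == 1))).map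
            (fun p => pvMsg p.1 p.2) := by
      rw [tail_eq, ← ih (v :: S)]
      apply List.map_congr_left
      intro y hy
      have hyv : y ≠ v := by
        rcases List.mem_filter.mp hy with ⟨_, hcond⟩
        rcases Bool.and_eq_true_iff.mp hcond with ⟨hnc, _⟩
        intro h; subst h; simp at hnc
      rw [h1 y hyv]
    -- the RHS tail: pairs carrying v are killed on both sides
    have rhs_tail :
        t.filter (fun p => !S.contains p.2 && ((List.filter (fun q => q.2 == p.2) ((k, v) :: t)).length == 1))
          = t.filter (fun p => !(v :: S).contains p.2 && ((t.filter (fun q => q.2 == p.2)).length == 1)) := by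
      apply List.filter_congr
      intro p hp
      by_cases hpv : p.2 = v
      · simp [hpv]
        intro _
        exact ⟨p.1, by rw [← hpv]; exact hp⟩
      · simp [h1 p.2 hpv, hpv]
    -- now split on the head condition
    have hsplit : List.filter (fun q => q.2 == v) ((k, v) :: t)
        = (k, v) :: List.filter (fun q => q.2 == v) t := by simp
    simp only [List.map_cons, PySem.Set.ofList_cons, PySem.Set.discard]
    conv_lhs => rw [List.filter_cons]
    conv_rhs => rw [List.filter_cons]
    dsimp only
    rw [hsplit]
    by_cases hC : (!S.contains v && (((k, v) :: List.filter (fun q => q.2 == v) t).length == 1)) = true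
    · have hnil : List.filter (fun q => q.2 == v) t = [] := by
        rcases Bool.and_eq_true_iff.mp hC with ⟨_, hlen⟩
        have hlen' : ((k, v) :: List.filter (fun q => q.2 == v) t).length = 1 := by
          simpa using hlen
        simp only [List.length_cons] at hlen'
        exact List.length_eq_zero_iff.mp (by omega)
      rw [if_pos hC, if_pos hC]
      simp only [List.map_cons]
      rw [tmap_eq, rhs_tail]
      congr 1
      rw [hsplit, hnil]
      simp [pysem]
    · rw [if_neg hC, if_neg hC]
      rw [tmap_eq, rhs_tail]

-- the grouping loop of B, characterised
theorem pv_groups (ps : List (String × String)) :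
    (ps.foldl (fun d p => d.modify p.2 [] (fun l => l ++ [p.1]))
        (PySem.Dict.empty : PySem.Dict String (List String))).items
    = (PySem.Set.ofList (ps.map (fun p => p.2))).map
        (fun v => (v, (ps.filter (fun q => q.2 == v)).map (fun q => q.1))) := by
  set G := ps.foldl (fun d p => d.modify p.2 [] (fun l => l ++ [p.1]))
        (PySem.Dict.empty : PySem.Dict String (List String)) with hG
  have hkeys : G.keys = PySem.Set.ofList (ps.map (fun p => p.2)) := by
    rw [hG, PySem.Dict.keys_foldl_modify_key ps (fun p => p.2) [] (fun _ p l => l ++ [p.1])]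
    simp [PySem.Set.update_nil_left]
  have hnd : G.keys.Nodup := by
    rw [hkeys]; exact PySem.Set.nodup_ofList _
  have hgetD : ∀ v, G.getD v [] = (ps.filter (fun q => q.2 == v)).map (fun q => q.1) := by
    intro v
    have hfold : ps.foldl (fun d p => d.modify p.2 [] (fun l => l ++ [p.1]))
        (PySem.Dict.empty : PySem.Dict String (List String))
        = (ps.map (fun p => (p.2, p.1))).foldl (fun d q => d.modify q.1 [] (fun l => l ++ [q.2]))
            PySem.Dict.empty := by
      rw [List.foldl_map]
    rw [hG, hfold, PySem.Dict.getD_foldl_modify_append]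
    simp [List.filter_map, Function.comp_def]
  rw [PySem.Dict.items_eq_map_keys G hnd [], hkeys]
  exact List.map_congr_left (fun v _ => by rw [hgetD v])
-- if at most one distinct perspective exists, no agent's value occurs exactly once
theorem pv_allsame (ps : List (String × String)) (h2 : ¬ ps.length < 2)
    (h1 : ¬ 1 < (PySem.Set.ofList (ps.map (fun p => p.2))).length) :
    ps.filter (fun p => ((ps.filter (fun q => q.2 == p.2)).length == 1)) = [] := by
  apply List.filter_eq_nil_iff.mpr
  intro p hp
  have hall : ps.filter (fun q => q.2 == p.2) = ps := by
    apply List.filter_eq_self.mpr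
    intro q hq
    have hq2 : q.2 ∈ PySem.Set.ofList (ps.map (fun p => p.2)) :=
      (PySem.Set.mem_ofList _ _).mpr (List.mem_map_of_mem hq)
    have hp2 : p.2 ∈ PySem.Set.ofList (ps.map (fun p => p.2)) :=
      (PySem.Set.mem_ofList _ _).mpr (List.mem_map_of_mem hp)
    rcases hX : PySem.Set.ofList (ps.map (fun p => p.2)) with _ | ⟨w, rest⟩
    · rw [hX] at hq2; simp at hq2
    · rcases rest with _ | ⟨w', rest'⟩
      · rw [hX] at hq2 hp2
        simp at hq2 hp2
        simp [hq2, hp2]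
      · rw [hX] at h1; simp at h1
  rw [hall]
  simp
  omega

-- ===== VERDICT (by name: the statement is the Claim_ definition above) =====
theorem identify_divergences_py_spec : Claim_equal_identify_divergences_py := by
  intro ps _
  unfold Spec_identify_divergences_py identify_divergences_py identify_divergences_py_alt
  by_cases hlen : ps.length < 2
  · simp [hlen]
  · rw [if_neg hlen, if_neg hlen]
    simp only []
    rw [pv_groups ps]
    rw [PySem.List.foldl_append_if (fun g : String × List String => g.2.length == 1)
      (fun g => pvMsg (PySem.List.pyGetD g.2 0 "") g.1)]
    have hB :
        ([] : List String) ++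
          (((PySem.Set.ofList (ps.map (fun p => p.2))).map
              (fun v => (v, (ps.filter (fun q => q.2 == v)).map (fun q => q.1)))).filter
            (fun g => g.2.length == 1)).map
          (fun g => pvMsg (PySem.List.pyGetD g.2 0 "") g.1)
        = (ps.filter (fun p => ((ps.filter (fun q => q.2 == p.2)).length == 1))).map
            (fun p => pvMsg p.1 p.2) := by
      rw [List.nil_append, List.filter_map, List.map_map]
      have := pv_core ps []
      simp only [List.contains_nil, Bool.not_false, Bool.true_and] at this
      rw [← this]
      simp [Function.comp_def]
    rw [hB]
    by_cases hset : 1 < (PySem.Set.ofList (ps.map (fun p => p.2))).length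
    · rw [if_pos hset]
      rw [PySem.List.foldl_append_if (fun p : String × String => (ps.map (fun p => p.2)).count p.2 == 1)
        (fun p => pvMsg p.1 p.2)]
      rw [List.nil_append]
      congr 1
      apply List.filter_congr
      intro p _
      rw [pv_cnt]
    · rw [if_neg hset]
      rw [pv_allsame ps hlen hset]
      simp
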